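-- pv_equiv track=rewrite | github.com/Proctor81/DELTA-2.0 | chat/chat_engine.py | _build_hf_history
-- ===== SOURCE A (Python) =====
-- MAX_HISTORY_TURNS = 6
--
-- def _build_hf_history(raw_history: list) -> list:
--     """
--     Converte la storia grezza (lista di stringhe) nel formato
--     messages OpenAI usato da HuggingFace InferenceClient.
--     Mantiene solo gli ultimi MAX_HISTORY_TURNS scambi.
--     """
--     messages = []
--     turns = []
--     for line in raw_history:
--         if line.startswith("Utente: "):
--             turns.append({"role": "user", "content": line[len("Utente: "):]})
--         elif line.startswith("DELTA: "):
--             turns.append({"role": "assistant", "content": line[len("DELTA: "):]})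
--     # Tronca alla finestra di contesto configurata
--     return turns[-(MAX_HISTORY_TURNS * 2):]
-- ===== SOURCE B (Python) =====
-- MAX_HISTORY_TURNS = 6
--
-- def _build_hf_history(raw_history: list) -> list:
--     # Scan the tail backward, filling a bounded buffer, instead of building
--     # the full list and slicing it; reverse the buffer at the end.
--     limit = MAX_HISTORY_TURNS * 2
--     buf = []
--     for line in reversed(raw_history):
--         if len(buf) == limit:
--             break
--         if line.startswith("Utente: "):
--             buf.append({"role": "user", "content": line[len("Utente: "):]})
--         elif line.startswith("DELTA: "):
--             buf.append({"role": "assistant", "content": line[len("DELTA: "):]})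
--     buf.reverse()
--     return buf
-- ===== Notes on version B (the rewrite author's own statement) =====
-- stated objective: alternative
-- what changed: B scans raw_history back-to-front filling a buffer bounded at MAX_HISTORY_TURNS*2 matched messages and stops early once the window is full, then reverses the buffer, instead of A's build-the-entire-list-then-slice-the-tail.
import Mathlib
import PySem

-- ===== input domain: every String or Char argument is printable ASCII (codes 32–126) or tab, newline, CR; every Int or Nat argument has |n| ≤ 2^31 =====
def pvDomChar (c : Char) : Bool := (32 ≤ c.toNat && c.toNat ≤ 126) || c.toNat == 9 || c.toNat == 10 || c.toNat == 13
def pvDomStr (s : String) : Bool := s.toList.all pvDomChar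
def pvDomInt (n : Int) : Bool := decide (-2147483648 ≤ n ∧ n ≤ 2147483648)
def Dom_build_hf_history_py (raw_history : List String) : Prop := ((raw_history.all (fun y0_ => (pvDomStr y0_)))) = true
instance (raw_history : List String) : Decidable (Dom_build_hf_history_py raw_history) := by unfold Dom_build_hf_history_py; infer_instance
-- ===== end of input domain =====

-- B scans raw_history back-to-front into a buffer bounded at 12 matched messages
-- (stopping early when full) and reverses it, instead of A's build-all-then-slice-tail.


-- ===== PORT A =====
def build_hf_history_py (raw_history : List String) : List (List (String × String)) :=
  let turns := raw_history.foldl (fun turns line =>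
    if PySem.Str.startswith line "Utente: " then
      turns ++ [[("role", "user"), ("content", PySem.Str.slice line (some 8) none)]]
    else if PySem.Str.startswith line "DELTA: " then
      turns ++ [[("role", "assistant"), ("content", PySem.Str.slice line (some 7) none)]]
    else turns) []
  PySem.List.slice turns (some (-12)) none

-- ===== PORT B =====
def bhfLoop : List String → List (List (String × String)) → List (List (String × String))
  | [], buf => buf
  | line :: rest, buf =>
    if buf.length == 12 then buf
    else if PySem.Str.startswith line "Utente: " then
      bhfLoop rest (buf ++ [[("role", "user"), ("content", PySem.Str.slice line (some 8) none)]])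
    else if PySem.Str.startswith line "DELTA: " then
      bhfLoop rest (buf ++ [[("role", "assistant"), ("content", PySem.Str.slice line (some 7) none)]])
    else bhfLoop rest buf

def build_hf_history_py_alt (raw_history : List String) : List (List (String × String)) :=
  (bhfLoop raw_history.reverse []).reverse

-- ===== PRECONDITION & SPEC =====
def Spec_build_hf_history_py (raw_history : List String) (out : List (List (String × String))) : Prop := out = build_hf_history_py_alt raw_history
instance (raw_history : List String) (out : List (List (String × String))) : Decidable (Spec_build_hf_history_py raw_history out) := by unfold Spec_build_hf_history_py; infer_instance

-- ===== CLAIM (what is proved, stated in full; the proofs are below) =====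
def Claim_equal_build_hf_history_py : Prop := ∀ (raw_history : List String), Dom_build_hf_history_py raw_history → Spec_build_hf_history_py raw_history (build_hf_history_py raw_history)

-- ===== LEMMAS AND PROOFS =====

/-- The per-line match both programs perform. -/
def bhfMsg (line : String) : Option (List (String × String)) :=
  if PySem.Str.startswith line "Utente: " then
    some [("role", "user"), ("content", PySem.Str.slice line (some 8) none)]
  else if PySem.Str.startswith line "DELTA: " then
    some [("role", "assistant"), ("content", PySem.Str.slice line (some 7) none)]
  else none

theorem bhf_foldA_eq (xs : List String) (acc : List (List (String × String))) :
    xs.foldl (fun turns line =>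
      if PySem.Str.startswith line "Utente: " then
        turns ++ [[("role", "user"), ("content", PySem.Str.slice line (some 8) none)]]
      else if PySem.Str.startswith line "DELTA: " then
        turns ++ [[("role", "assistant"), ("content", PySem.Str.slice line (some 7) none)]]
      else turns) acc = acc ++ xs.filterMap bhfMsg := by
  induction xs generalizing acc with
  | nil => simp
  | cons line rest ih =>
    simp only [List.foldl_cons, List.filterMap_cons]
    by_cases h2 : PySem.Str.startswith line "Utente: " = true
    · have hm : bhfMsg line = some [("role", "user"), ("content", PySem.Str.slice line (some 8) none)] := by
        simp only [bhfMsg, if_pos h2]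
      rw [if_pos h2, ih, hm]
      simp
    · by_cases h3 : PySem.Str.startswith line "DELTA: " = true
      · have hm : bhfMsg line = some [("role", "assistant"), ("content", PySem.Str.slice line (some 7) none)] := by
          simp only [bhfMsg, if_neg h2, if_pos h3]
        rw [if_neg h2, if_pos h3, ih, hm]
        simp
      · have hm : bhfMsg line = none := by simp only [bhfMsg, if_neg h2, if_neg h3]
        rw [if_neg h2, if_neg h3, ih, hm]

theorem bhfLoop_eq (xs : List String) (buf : List (List (String × String)))
    (h : buf.length ≤ 12) :
    bhfLoop xs buf = buf ++ (xs.filterMap bhfMsg).take (12 - buf.length) := by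
  induction xs generalizing buf with
  | nil => simp [bhfLoop]
  | cons line rest ih =>
    simp only [bhfLoop, List.filterMap_cons]
    split_ifs with h1 h2 h3
    · simp only [beq_iff_eq] at h1
      simp [h1]
    · have hlt : buf.length < 12 := by simp only [beq_iff_eq] at h1; omega
      have hm : bhfMsg line = some [("role", "user"), ("content", PySem.Str.slice line (some 8) none)] := by
        simp only [bhfMsg, if_pos h2]
      rw [ih _ (by simp; omega), hm]
      have htake : 12 - buf.length = (12 - (buf.length + 1)) + 1 := by omega
      rw [htake]
      simp
    · have hlt : buf.length < 12 := by simp only [beq_iff_eq] at h1; omega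
      have hm : bhfMsg line = some [("role", "assistant"), ("content", PySem.Str.slice line (some 7) none)] := by
        simp only [bhfMsg, if_neg h2, if_pos h3]
      rw [ih _ (by simp; omega), hm]
      have htake : 12 - buf.length = (12 - (buf.length + 1)) + 1 := by omega
      rw [htake]
      simp
    · have hm : bhfMsg line = none := by simp only [bhfMsg, if_neg h2, if_neg h3]
      rw [ih _ h, hm]

-- ===== VERDICT (by name: the statement is the Claim_ definition above) =====
theorem build_hf_history_py_spec : Claim_equal_build_hf_history_py := by
  intro raw _
  show build_hf_history_py raw = build_hf_history_py_alt raw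
  unfold build_hf_history_py build_hf_history_py_alt
  rw [bhf_foldA_eq, bhfLoop_eq _ _ (by simp)]
  simp only [List.nil_append, List.length_nil, Nat.sub_zero]
  rw [PySem.List.slice_from_neg_ofNat _ 12 (by omega)]
  rw [List.filterMap_reverse, List.take_reverse, List.reverse_reverse]
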